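-- pv_equiv track=rewrite | github.com/natsu1986/melody_creator | melody_creator.py | end_note_adj
-- ===== SOURCE A (Python) =====
-- def end_note_adj(ending_note):
--     while True:
--         if ending_note % 5 != 0 or ending_note % 8 != 0 :
--             ending_note += 1
--         else:
--             ending_note = ending_note
--             break
--     return ending_note
-- ===== SOURCE B (Python) =====
-- def end_note_adj(ending_note):
--     # closed form: add the distance to the next multiple of 40 (= lcm(5, 8))
--     return ending_note + (-ending_note % 40)
-- ===== Notes on version B (the rewrite author's own statement) =====
-- stated objective: idiomatic
-- what changed: Replaces the increment-until-divisible while loop with a closed-form modulus expression that adds the distance to the next multiple of lcm(5, 8) without iterating.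
import Mathlib
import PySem

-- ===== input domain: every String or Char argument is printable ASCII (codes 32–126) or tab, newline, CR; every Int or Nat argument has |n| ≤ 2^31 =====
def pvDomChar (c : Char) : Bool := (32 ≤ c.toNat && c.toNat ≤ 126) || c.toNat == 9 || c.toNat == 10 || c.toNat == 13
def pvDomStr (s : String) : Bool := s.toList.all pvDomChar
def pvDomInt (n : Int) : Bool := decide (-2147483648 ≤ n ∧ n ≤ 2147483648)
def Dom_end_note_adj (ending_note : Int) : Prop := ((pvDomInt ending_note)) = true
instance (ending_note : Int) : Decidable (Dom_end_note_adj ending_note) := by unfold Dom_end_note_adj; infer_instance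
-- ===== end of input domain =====

-- B replaces A's increment-until-divisible loop by the closed form n + (-n % 40); no speed claim (A does at most 39 iterations).

-- ===== PORT A =====
def end_note_adj (ending_note : Int) : Int :=
  if PySem.Int.mod ending_note 5 ≠ 0 ∨ PySem.Int.mod ending_note 8 ≠ 0 then
    end_note_adj (ending_note + 1)
  else
    ending_note
termination_by ((-ending_note) % 40).toNat
decreasing_by
  rw [PySem.Int.mod_eq_emod_of_pos (by norm_num), PySem.Int.mod_eq_emod_of_pos (by norm_num)] at *
  omega

-- ===== PORT B =====
def end_note_adj_alt (ending_note : Int) : Int :=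
  ending_note + PySem.Int.mod (-ending_note) 40

-- ===== PRECONDITION & SPEC =====
def Spec_end_note_adj (ending_note : Int) (out : Int) : Prop := out = end_note_adj_alt ending_note
instance (ending_note : Int) (out : Int) : Decidable (Spec_end_note_adj ending_note out) := by unfold Spec_end_note_adj; infer_instance

-- ===== CLAIM (what is proved, stated in full; the proofs are below) =====
def Claim_equal_end_note_adj : Prop := ∀ (ending_note : Int), Dom_end_note_adj ending_note → Spec_end_note_adj ending_note (end_note_adj ending_note)

-- ===== LEMMAS AND PROOFS =====
theorem end_note_adj_eq_alt (n : Int) : end_note_adj n = end_note_adj_alt n := by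
  induction n using end_note_adj.induct with
  | case1 n h ih =>
    rw [end_note_adj, if_pos h, ih]
    unfold end_note_adj_alt
    rw [PySem.Int.mod_eq_emod_of_pos (by norm_num),
        PySem.Int.mod_eq_emod_of_pos (by norm_num)]
    rw [PySem.Int.mod_eq_emod_of_pos (by norm_num : (0:Int) < 5),
        PySem.Int.mod_eq_emod_of_pos (by norm_num : (0:Int) < 8)] at h
    omega
  | case2 n h =>
    rw [end_note_adj, if_neg h]
    unfold end_note_adj_alt
    rw [PySem.Int.mod_eq_emod_of_pos (by norm_num)]
    push_neg at h
    rw [PySem.Int.mod_eq_emod_of_pos (by norm_num : (0:Int) < 5),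
        PySem.Int.mod_eq_emod_of_pos (by norm_num : (0:Int) < 8)] at h
    omega

-- ===== VERDICT (by name: the statement is the Claim_ definition above) =====
theorem end_note_adj_spec : Claim_equal_end_note_adj := by
  intro n _
  exact end_note_adj_eq_alt n
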